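-- pv_equiv track=rewrite | github.com/morisanyutakun-png/Latex_gui | backend/app/preview_service.py | _skip_optional_arg
-- ===== SOURCE A (Python) =====
-- def _skip_optional_arg(s: str, i: int) -> int:
--     """`[...]` を飲み込んで終了位置を返す。`[` でなければ i を返す。"""
--     n = len(s)
--     if i >= n or s[i] != "[":
--         return i
--     depth = 0
--     while i < n:
--         c = s[i]
--         if c == "[":
--             depth += 1
--         elif c == "]":
--             depth -= 1
--             if depth == 0:
--                 return i + 1
--         i += 1
--     return n
-- ===== SOURCE B (Python) =====
-- def _skip_optional_arg(s: str, i: int) -> int: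
--     """`[...]` を飲み込んで終了位置を返す。`[` でなければ i を返す。
--     Recursive-descent variant: nesting is tracked by the call stack, not a counter."""
--     n = len(s)
--     if i >= n or s[i] != "[":
--         return i
--     return _consume_group(s, i + 1, n)
--
--
-- def _consume_group(s: str, j: int, n: int) -> int:
--     # Called just past a '['.  Returns the position after its matching ']',
--     # or n if the string ends before the group is closed.
--     while j < n:
--         c = s[j]
--         if c == "]":
--             return j + 1
--         if c == "[":
--             j = _consume_group(s, j + 1, n)
--         else:
--             j += 1
--     return n
-- ===== Notes on version B (the rewrite author's own statement) =====
-- stated objective: alternative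
-- what changed: Replaces A's single flat scan with an explicit depth counter by a recursive-descent consumer: a helper is entered just inside each '[', recurses on nested '[' (jumping to the returned position) and returns just past its matching ']', so nesting lives on the call stack instead of an integer.
import Mathlib
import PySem

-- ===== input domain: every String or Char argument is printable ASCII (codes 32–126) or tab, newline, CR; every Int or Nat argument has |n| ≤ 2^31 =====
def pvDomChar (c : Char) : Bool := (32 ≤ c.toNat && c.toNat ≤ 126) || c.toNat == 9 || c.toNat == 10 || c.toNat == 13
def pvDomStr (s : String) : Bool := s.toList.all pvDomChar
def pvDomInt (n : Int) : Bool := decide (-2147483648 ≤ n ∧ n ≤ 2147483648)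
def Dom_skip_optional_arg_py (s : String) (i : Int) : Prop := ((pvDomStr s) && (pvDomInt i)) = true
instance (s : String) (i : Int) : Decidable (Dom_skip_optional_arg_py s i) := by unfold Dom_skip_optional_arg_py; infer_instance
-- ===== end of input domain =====

-- B replaces A's flat scan with a depth counter by a recursive-descent group consumer
-- (nesting tracked by the call stack); same cost, different decomposition.


-- ===== PORT A =====
-- A's while loop: state (i, depth); s[i] via PySem.List.pyGet? (none = IndexError,
-- unreachable under Pre_, arbitrary value 0 there).
def pvA_loop (cs : List Char) (n i depth : Int) : Int :=
  if _h : i < n then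
    match PySem.List.pyGet? cs i with
    | none => 0
    | some c =>
      if c = '[' then pvA_loop cs n (i + 1) (depth + 1)
      else if c = ']' then
        if depth - 1 = 0 then i + 1 else pvA_loop cs n (i + 1) (depth - 1)
      else pvA_loop cs n (i + 1) depth
  else n
termination_by (n - i).toNat
decreasing_by all_goals omega

def skip_optional_arg_py (s : String) (i : Int) : Int :=
  let cs := s.toList
  let n : Int := (cs.length : Int)
  if i ≥ n then i
  else
    match PySem.List.pyGet? cs i with
    | none => 0            -- IndexError in Python (excluded by Pre_)
    | some c => if c ≠ '[' then i else pvA_loop cs n i 0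

-- ===== PORT B =====
-- B's _consume_group: a while loop over j whose '[' case recurses on the nested group.
-- Fuel only makes the nested recursion total; the top call supplies enough fuel
-- ((n-i).toNat) that it never runs out on admitted inputs.
def pvB_consume (cs : List Char) (n : Int) : Nat → Int → Int
  | 0, _ => n
  | f + 1, j =>
    if j < n then
      match PySem.List.pyGet? cs j with
      | none => j          -- IndexError in Python (unreachable under Pre_)
      | some c =>
        if c = ']' then j + 1
        else if c = '[' then pvB_consume cs n f (pvB_consume cs n f (j + 1))
        else pvB_consume cs n f (j + 1)
    else n

def skip_optional_arg_py_alt (s : String) (i : Int) : Int :=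
  let cs := s.toList
  let n : Int := (cs.length : Int)
  if i ≥ n then i
  else
    match PySem.List.pyGet? cs i with
    | none => 0            -- IndexError in Python (excluded by Pre_)
    | some c => if c ≠ '[' then i else pvB_consume cs n (n - i).toNat (i + 1)

-- ===== PRECONDITION & SPEC =====
-- A raises IndexError exactly when i < -len(s) (then i < n and s[i] is out of range);
-- B raises there too.  Pre_ excludes exactly those inputs.
def Pre_skip_optional_arg_py (s : String) (i : Int) : Prop :=
  -(s.toList.length : Int) ≤ i
instance (s : String) (i : Int) : Decidable (Pre_skip_optional_arg_py s i) := by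
  unfold Pre_skip_optional_arg_py; infer_instance

def pvWitness_skip_optional_arg_py : String × Int := ("[a[b]]c", 0)

def Spec_skip_optional_arg_py (s : String) (i : Int) (out : Int) : Prop :=
  out = skip_optional_arg_py_alt s i
instance (s : String) (i : Int) (out : Int) : Decidable (Spec_skip_optional_arg_py s i out) := by
  unfold Spec_skip_optional_arg_py; infer_instance

-- ===== CLAIM (what is proved, stated in full; the proofs are below) =====
def Claim_equal_skip_optional_arg_py : Prop :=
  ∀ (s : String) (i : Int), Dom_skip_optional_arg_py s i →
    Pre_skip_optional_arg_py s i →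
    Spec_skip_optional_arg_py s i (skip_optional_arg_py s i)

-- ===== LEMMAS AND PROOFS =====

-- canonical fuel for a call of the consumer at position j
def pvBc (cs : List Char) (j : Int) : Int :=
  pvB_consume cs (cs.length : Int) (((cs.length : Int) - j).toNat + 1) j

-- one unfolding of B's loop when s[j] exists
lemma pvB_step_some (cs : List Char) (n : Int) (f : Nat) (j : Int) (c : Char)
    (hjn : j < n) (hc : PySem.List.pyGet? cs j = some c) :
    pvB_consume cs n (f + 1) j =
      if c = ']' then j + 1
      else if c = '[' then pvB_consume cs n f (pvB_consume cs n f (j + 1))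
      else pvB_consume cs n f (j + 1) := by
  show (if j < n then
      match PySem.List.pyGet? cs j with
      | none => j
      | some c =>
        if c = ']' then j + 1
        else if c = '[' then pvB_consume cs n f (pvB_consume cs n f (j + 1))
        else pvB_consume cs n f (j + 1)
    else n) = _
  rw [if_pos hjn, hc]

lemma pvB_past_end (cs : List Char) (n : Int) (f : Nat) (j : Int) (h : ¬ j < n) :
    pvB_consume cs n f j = n := by
  cases f with
  | zero => rfl
  | succ f =>
    show (if j < n then
        match PySem.List.pyGet? cs j with
        | none => j
        | some c =>
          if c = ']' then j + 1
          else if c = '[' then pvB_consume cs n f (pvB_consume cs n f (j + 1))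
          else pvB_consume cs n f (j + 1)
      else n) = n
    rw [if_neg h]

-- one unfolding of A's loop when s[i] exists
lemma pvA_step_some (cs : List Char) (n i depth : Int) (c : Char)
    (hin : i < n) (hc : PySem.List.pyGet? cs i = some c) :
    pvA_loop cs n i depth =
      if c = '[' then pvA_loop cs n (i + 1) (depth + 1)
      else if c = ']' then
        if depth - 1 = 0 then i + 1 else pvA_loop cs n (i + 1) (depth - 1)
      else pvA_loop cs n (i + 1) depth := by
  rw [pvA_loop, dif_pos hin, hc]

lemma pvA_loop_past_end (cs : List Char) (n j d : Int) (h : ¬ j < n) :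
    pvA_loop cs n j d = n := by
  rw [pvA_loop, dif_neg h]

lemma pvGet_isSome (cs : List Char) (j : Int)
    (h1 : -(cs.length : Int) ≤ j) (h2 : j < (cs.length : Int)) :
    ∃ c, PySem.List.pyGet? cs j = some c := by
  cases hg : PySem.List.pyGet? cs j with
  | none =>
    rw [PySem.List.pyGet?_eq_none_iff] at hg
    exact absurd ⟨h1, h2⟩ hg
  | some c => exact ⟨c, rfl⟩

lemma pvB_bounds (cs : List Char) :
    ∀ (f : Nat) (j : Int), -(cs.length : Int) ≤ j →
      pvB_consume cs (cs.length : Int) f j ≤ (cs.length : Int) ∧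
      -(cs.length : Int) ≤ pvB_consume cs (cs.length : Int) f j ∧
      (j < (cs.length : Int) → 1 ≤ f → j + 1 ≤ pvB_consume cs (cs.length : Int) f j) := by
  intro f
  induction f with
  | zero =>
    intro j hj
    have e : pvB_consume cs (cs.length : Int) 0 j = (cs.length : Int) := rfl
    exact ⟨by omega, by omega, fun _ h => by omega⟩
  | succ f IH =>
    intro j hj
    by_cases hjn : j < (cs.length : Int)
    · obtain ⟨c, hc⟩ := pvGet_isSome cs j hj hjn
      rw [pvB_step_some cs (cs.length : Int) f j c hjn hc]
      by_cases hcl : c = ']'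
      · rw [if_pos hcl]
        exact ⟨by omega, by omega, fun _ _ => by omega⟩
      · by_cases hop : c = '['
        · rw [if_neg hcl, if_pos hop]
          have h1 := IH (j + 1) (by omega)
          have h2 := IH (pvB_consume cs (cs.length : Int) f (j + 1)) h1.2.1
          refine ⟨h2.1, h2.2.1, fun _ _ => ?_⟩
          rcases Nat.eq_zero_or_pos f with hf | hf
          · subst hf
            have e : pvB_consume cs (cs.length : Int) 0
                (pvB_consume cs (cs.length : Int) 0 (j + 1)) = (cs.length : Int) := rfl
            omega
          · by_cases hj1 : j + 1 < (cs.length : Int)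
            · have hr2 := h1.2.2 hj1 hf
              by_cases hrn : pvB_consume cs (cs.length : Int) f (j + 1) < (cs.length : Int)
              · have := h2.2.2 hrn hf; omega
              · have e := pvB_past_end cs (cs.length : Int) f _ hrn; omega
            · have hr := pvB_past_end cs (cs.length : Int) f (j + 1) hj1
              have e : pvB_consume cs (cs.length : Int) f
                  (pvB_consume cs (cs.length : Int) f (j + 1)) = (cs.length : Int) := by
                rw [hr]; exact pvB_past_end cs _ f _ (by omega)
              omega
        · rw [if_neg hcl, if_neg hop]
          have h1 := IH (j + 1) (by omega)
          refine ⟨h1.1, h1.2.1, fun _ _ => ?_⟩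
          rcases Nat.eq_zero_or_pos f with hf | hf
          · subst hf
            have e : pvB_consume cs (cs.length : Int) 0 (j + 1) = (cs.length : Int) := rfl
            omega
          · by_cases hj1 : j + 1 < (cs.length : Int)
            · have := h1.2.2 hj1 hf; omega
            · have e := pvB_past_end cs (cs.length : Int) f (j + 1) hj1; omega
    · have e := pvB_past_end cs (cs.length : Int) (f + 1) j hjn
      exact ⟨by omega, by omega, fun h _ => absurd h hjn⟩

-- fuel irrelevance: any fuel strictly above (n - j).toNat computes the same value
lemma pvB_fuel (cs : List Char) :
    ∀ (k : Nat) (f f' : Nat) (j : Int), -(cs.length : Int) ≤ j →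
      ((cs.length : Int) - j).toNat = k → k < f → k < f' →
      pvB_consume cs (cs.length : Int) f j = pvB_consume cs (cs.length : Int) f' j := by
  intro k
  induction k using Nat.strong_induction_on with
  | _ k IH =>
    intro f f' j hj hk hf hf'
    obtain ⟨f, rfl⟩ : ∃ g, f = g + 1 := ⟨f - 1, by omega⟩
    obtain ⟨f', rfl⟩ : ∃ g, f' = g + 1 := ⟨f' - 1, by omega⟩
    by_cases hjn : j < (cs.length : Int)
    · obtain ⟨c, hc⟩ := pvGet_isSome cs j hj hjn
      rw [pvB_step_some cs (cs.length : Int) f j c hjn hc,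
        pvB_step_some cs (cs.length : Int) f' j c hjn hc]
      by_cases hcl : c = ']'
      · rw [if_pos hcl, if_pos hcl]
      · by_cases hop : c = '['
        · rw [if_neg hcl, if_pos hop, if_neg hcl, if_pos hop]
          have hrec : pvB_consume cs (cs.length : Int) f (j + 1)
              = pvB_consume cs (cs.length : Int) f' (j + 1) :=
            IH (((cs.length : Int) - (j + 1)).toNat) (by omega) f f' (j + 1)
              (by omega) rfl (by omega) (by omega)
          rw [hrec]
          have hb := pvB_bounds cs f' (j + 1) (by omega)
          by_cases h : pvB_consume cs (cs.length : Int) f' (j + 1) < (cs.length : Int)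
          · have hj1 : j + 1 < (cs.length : Int) := by
              by_contra hle
              have := pvB_past_end cs (cs.length : Int) f' (j + 1) hle
              omega
            have hr2 : j + 2 ≤ pvB_consume cs (cs.length : Int) f' (j + 1) := by
              have := hb.2.2 hj1 (by omega); omega
            exact IH (((cs.length : Int) - pvB_consume cs (cs.length : Int) f' (j + 1)).toNat)
              (by omega) f f' _ (by omega) rfl (by omega) (by omega)
          · rw [pvB_past_end cs (cs.length : Int) f _ h,
                pvB_past_end cs (cs.length : Int) f' _ h]
        · rw [if_neg hcl, if_neg hop, if_neg hcl, if_neg hop]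
          exact IH (((cs.length : Int) - (j + 1)).toNat) (by omega) f f' (j + 1)
            (by omega) rfl (by omega) (by omega)
    · rw [pvB_past_end cs (cs.length : Int) (f + 1) j hjn,
          pvB_past_end cs (cs.length : Int) (f' + 1) j hjn]

lemma pvBc_ge_past_end (cs : List Char) (j : Int) (h : ¬ j < (cs.length : Int)) :
    pvBc cs j = (cs.length : Int) :=
  pvB_past_end cs (cs.length : Int) _ j h

lemma pvBc_bounds (cs : List Char) (j : Int) (hj : -(cs.length : Int) ≤ j) :
    pvBc cs j ≤ (cs.length : Int) ∧ -(cs.length : Int) ≤ pvBc cs j ∧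
      (j < (cs.length : Int) → j + 1 ≤ pvBc cs j) := by
  have h := pvB_bounds cs ((((cs.length : Int) - j).toNat + 1)) j hj
  exact ⟨h.1, h.2.1, fun hlt => h.2.2 hlt (by omega)⟩

-- one canonical-fuel unfolding of the consumer
lemma pvBc_step (cs : List Char) (j : Int) (hj : -(cs.length : Int) ≤ j)
    (hjn : j < (cs.length : Int)) (c : Char) (hc : PySem.List.pyGet? cs j = some c) :
    pvBc cs j = if c = ']' then j + 1
      else if c = '[' then pvBc cs (pvBc cs (j + 1)) else pvBc cs (j + 1) := by
  have hL : pvBc cs j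
      = if c = ']' then j + 1
        else if c = '[' then
          pvB_consume cs (cs.length : Int) ((cs.length : Int) - j).toNat
            (pvB_consume cs (cs.length : Int) ((cs.length : Int) - j).toNat (j + 1))
        else pvB_consume cs (cs.length : Int) ((cs.length : Int) - j).toNat (j + 1) :=
    pvB_step_some cs (cs.length : Int) (((cs.length : Int) - j).toNat) j c hjn hc
  rw [hL]
  by_cases hcl : c = ']'
  · rw [if_pos hcl, if_pos hcl]
  · by_cases hop : c = '['
    · rw [if_neg hcl, if_pos hop, if_neg hcl, if_pos hop]
      have hin : pvB_consume cs (cs.length : Int) ((cs.length : Int) - j).toNat (j + 1)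
          = pvBc cs (j + 1) := by
        rw [pvBc]
        exact pvB_fuel cs (((cs.length : Int) - (j + 1)).toNat)
          (((cs.length : Int) - j).toNat) ((((cs.length : Int) - (j + 1)).toNat) + 1) (j + 1)
          (by omega) rfl (by omega) (by omega)
      rw [hin]
      have hbr := pvBc_bounds cs (j + 1) (by omega)
      by_cases h : pvBc cs (j + 1) < (cs.length : Int)
      · have hj1 : j + 1 < (cs.length : Int) := by
          by_contra hle
          have := pvBc_ge_past_end cs (j + 1) hle
          omega
        have hr2 : j + 2 ≤ pvBc cs (j + 1) := by have := hbr.2.2 hj1; omega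
        have hk2 : (((cs.length : Int) - pvBc cs (j + 1)).toNat) < ((cs.length : Int) - j).toNat := by
          omega
        rw [pvBc]
        exact pvB_fuel cs (((cs.length : Int) - pvBc cs (j + 1)).toNat)
          (((cs.length : Int) - j).toNat)
          ((((cs.length : Int) - pvBc cs (j + 1)).toNat) + 1) (pvBc cs (j + 1))
          hbr.2.1 rfl hk2 (by omega)
      · rw [pvB_past_end cs (cs.length : Int) _ _ h, pvBc_ge_past_end cs _ h]
    · rw [if_neg hcl, if_neg hop, if_neg hcl, if_neg hop]
      rw [pvBc]
      exact pvB_fuel cs (((cs.length : Int) - (j + 1)).toNat)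
        (((cs.length : Int) - j).toNat) ((((cs.length : Int) - (j + 1)).toNat) + 1) (j + 1)
        (by omega) rfl (by omega) (by omega)

-- main invariant: the recursive consumer equals the depth-counter loop
lemma pvMain (cs : List Char) :
    ∀ (k : Nat) (j : Int), -(cs.length : Int) ≤ j → ((cs.length : Int) - j).toNat = k →
      (∀ d : Int, 1 ≤ d →
        pvA_loop cs (cs.length : Int) j (d + 1) = pvA_loop cs (cs.length : Int) (pvBc cs j) d) ∧
      pvA_loop cs (cs.length : Int) j 1 = pvBc cs j := by
  intro k
  induction k using Nat.strong_induction_on with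
  | _ k IH =>
    intro j hj hk
    by_cases hjn : j < (cs.length : Int)
    · obtain ⟨c, hc⟩ := pvGet_isSome cs j hj hjn
      have hstep := pvBc_step cs j hj hjn c hc
      have hIH1 := IH (((cs.length : Int) - (j + 1)).toNat) (by omega) (j + 1) (by omega) rfl
      by_cases hcl : c = ']'
      · subst hcl
        have hne : (']' : Char) ≠ '[' := by decide
        rw [if_pos rfl] at hstep
        constructor
        · intro d hd
          rw [pvA_step_some cs (cs.length : Int) j (d + 1) ']' hjn hc,
            if_neg hne, if_pos rfl, if_neg (by omega : ¬ d + 1 - 1 = 0),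
            (by omega : d + 1 - 1 = d), hstep]
        · rw [pvA_step_some cs (cs.length : Int) j 1 ']' hjn hc,
            if_neg hne, if_pos rfl, if_pos (by omega : (1 : Int) - 1 = 0), hstep]
      · by_cases hop : c = '['
        · subst hop
          rw [if_neg hcl, if_pos rfl] at hstep
          have hbr := pvBc_bounds cs (j + 1) (by omega)
          have hrk : (((cs.length : Int) - pvBc cs (j + 1)).toNat) < k := by
            by_cases hj1 : j + 1 < (cs.length : Int)
            · have := hbr.2.2 hj1; omega
            · have := pvBc_ge_past_end cs (j + 1) hj1; omega
          have hIHr := IH (((cs.length : Int) - pvBc cs (j + 1)).toNat) hrk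
            (pvBc cs (j + 1)) hbr.2.1 rfl
          constructor
          · intro d hd
            rw [pvA_step_some cs (cs.length : Int) j (d + 1) '[' hjn hc, if_pos rfl,
              hIH1.1 (d + 1) (by omega), hIHr.1 d hd, ← hstep]
          · rw [pvA_step_some cs (cs.length : Int) j 1 '[' hjn hc, if_pos rfl,
              hIH1.1 1 (by omega), hIHr.2, ← hstep]
        · rw [if_neg hcl, if_neg hop] at hstep
          constructor
          · intro d hd
            rw [pvA_step_some cs (cs.length : Int) j (d + 1) c hjn hc,
              if_neg hop, if_neg hcl, hIH1.1 d hd, ← hstep]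
          · rw [pvA_step_some cs (cs.length : Int) j 1 c hjn hc,
              if_neg hop, if_neg hcl, hIH1.2, ← hstep]
    · have hb := pvBc_ge_past_end cs j hjn
      constructor
      · intro d hd
        rw [pvA_loop_past_end cs (cs.length : Int) j _ hjn, hb,
          pvA_loop_past_end cs (cs.length : Int) _ d (by omega)]
      · rw [pvA_loop_past_end cs (cs.length : Int) j _ hjn, hb]

-- ===== VERDICT (by name: the statement is the Claim_ definition above) =====
theorem skip_optional_arg_py_spec : Claim_equal_skip_optional_arg_py := by
  intro s i _hdom hpre
  unfold Spec_skip_optional_arg_py skip_optional_arg_py skip_optional_arg_py_alt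
  set cs := s.toList with hcs
  by_cases hge : i ≥ (cs.length : Int)
  · simp [hge]
  · simp only [if_neg hge]
    have hj : -(cs.length : Int) ≤ i := hpre
    obtain ⟨c, hc⟩ := pvGet_isSome cs i hj (by omega)
    rw [hc]
    by_cases hop : c = '['
    · simp only [hop, ne_eq, not_true_eq_false, if_false]
      have hA : pvA_loop cs (cs.length : Int) i 0
          = pvA_loop cs (cs.length : Int) (i + 1) 1 := by
        rw [pvA_step_some cs (cs.length : Int) i 0 '[' (by omega) (hop ▸ hc), if_pos rfl,
          (by omega : (0 : Int) + 1 = 1)]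
      have hmain := (pvMain cs (((cs.length : Int) - (i + 1)).toNat) (i + 1) (by omega) rfl).2
      have hfuel : ((cs.length : Int) - i).toNat = ((cs.length : Int) - (i + 1)).toNat + 1 := by
        omega
      rw [hA, hmain, pvBc, ← hfuel]
    · simp [hop]
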